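-- pv_equiv track=rewrite | github.com/Promaia/promaia-py | promaia/cli/schedule_grid_selector.py | schedule_from_interval
-- ===== SOURCE A (Python) =====
-- from typing import List, Tuple, Optional, Set
--
-- def schedule_from_interval(interval_minutes: int) -> List[Tuple[str, str]]:
--     """
--     Convert old interval format to schedule format.
--     For backwards compatibility.
--
--     Args:
--         interval_minutes: Interval in minutes
--
--     Returns:
--         Schedule as list of (day, time) tuples
--     """
--     # For simple intervals, just schedule every N hours on all days
--     if interval_minutes == 60:
--         # Every hour, 9-5 on weekdays
--         times = ["09:00", "10:00", "11:00", "12:00", "13:00", "14:00", "15:00", "16:00", "17:00"]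
--         schedule = []
--         for day in ["Mon", "Tue", "Wed", "Thu", "Fri"]:
--             for time in times:
--                 schedule.append((day, time))
--         return schedule
--
--     elif interval_minutes == 30:
--         # Every 30 minutes, 9-5 on weekdays
--         times = ["09:00", "09:30", "10:00", "10:30", "11:00", "11:30",
--                  "12:00", "12:30", "13:00", "13:30", "14:00", "14:30",
--                  "15:00", "15:30", "16:00", "16:30", "17:00"]
--         schedule = []
--         for day in ["Mon", "Tue", "Wed", "Thu", "Fri"]:
--             for time in times:
--                 schedule.append((day, time))
--         return schedule
--
--     # Default: run a few times a day
--     return [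
--         ("Mon", "09:00"), ("Mon", "12:00"), ("Mon", "18:00"),
--         ("Tue", "09:00"), ("Tue", "12:00"), ("Tue", "18:00"),
--         ("Wed", "09:00"), ("Wed", "12:00"), ("Wed", "18:00"),
--         ("Thu", "09:00"), ("Thu", "12:00"), ("Thu", "18:00"),
--         ("Fri", "09:00"), ("Fri", "12:00"), ("Fri", "18:00"),
--     ]
-- ===== SOURCE B (Python) =====
-- from typing import List, Tuple
--
-- def schedule_from_interval(interval_minutes: int) -> List[Tuple[str, str]]:
--     """Same mapping as A, but the uniform 60/30-minute grids are generated
--     arithmetically over minute offsets instead of being listed."""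
--     if interval_minutes in (60, 30):
--         times = ["%02d:%02d" % (m // 60, m % 60)
--                  for m in range(540, 1021, interval_minutes)]
--     else:
--         times = ["09:00", "12:00", "18:00"]
--     return [(day, time)
--             for day in ["Mon", "Tue", "Wed", "Thu", "Fri"]
--             for time in times]
-- ===== Notes on version B (the rewrite author's own statement) =====
-- stated objective: idiomatic
-- what changed: B generates the 60- and 30-minute time grids arithmetically (minute offsets 540..1020 formatted as HH:MM) and builds the schedule as a single day-by-time product comprehension, instead of A's hard-coded time lists and explicit nested append loops.
import Mathlib
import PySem

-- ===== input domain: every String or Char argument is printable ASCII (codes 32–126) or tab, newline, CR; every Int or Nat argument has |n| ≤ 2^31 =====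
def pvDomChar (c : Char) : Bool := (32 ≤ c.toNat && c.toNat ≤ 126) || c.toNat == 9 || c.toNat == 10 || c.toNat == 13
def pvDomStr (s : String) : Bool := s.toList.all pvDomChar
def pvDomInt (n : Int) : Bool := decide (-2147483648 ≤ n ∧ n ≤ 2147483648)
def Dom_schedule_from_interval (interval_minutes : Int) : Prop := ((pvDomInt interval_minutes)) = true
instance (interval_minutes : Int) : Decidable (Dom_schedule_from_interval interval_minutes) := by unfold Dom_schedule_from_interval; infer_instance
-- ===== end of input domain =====

-- B generates the uniform 60/30-minute time grids arithmetically and builds the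
-- schedule as one day×time product, instead of A's hard-coded lists and nested
-- append loops (objective: idiomatic; same behaviour, same cost).


-- ===== PORT A =====
def schedule_from_interval (interval_minutes : Int) : List (String × String) :=
  if interval_minutes = 60 then
    let times := ["09:00", "10:00", "11:00", "12:00", "13:00", "14:00", "15:00", "16:00", "17:00"]
    ["Mon", "Tue", "Wed", "Thu", "Fri"].foldl (fun schedule day =>
      times.foldl (fun schedule time => schedule ++ [(day, time)]) schedule) []
  else if interval_minutes = 30 then
    let times := ["09:00", "09:30", "10:00", "10:30", "11:00", "11:30",
                  "12:00", "12:30", "13:00", "13:30", "14:00", "14:30",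
                  "15:00", "15:30", "16:00", "16:30", "17:00"]
    ["Mon", "Tue", "Wed", "Thu", "Fri"].foldl (fun schedule day =>
      times.foldl (fun schedule time => schedule ++ [(day, time)]) schedule) []
  else
    [("Mon", "09:00"), ("Mon", "12:00"), ("Mon", "18:00"),
     ("Tue", "09:00"), ("Tue", "12:00"), ("Tue", "18:00"),
     ("Wed", "09:00"), ("Wed", "12:00"), ("Wed", "18:00"),
     ("Thu", "09:00"), ("Thu", "12:00"), ("Thu", "18:00"),
     ("Fri", "09:00"), ("Fri", "12:00"), ("Fri", "18:00")]

-- ===== PORT B =====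
-- "%02d" % v for the nonnegative values reached here: pad str(v) on the left to width 2
def pvPad2 (s : List Char) : List Char := if s.length < 2 then '0' :: s else s
-- "%02d:%02d" % (m // 60, m % 60)
def pvFmt (m : Int) : String :=
  String.ofList (pvPad2 (PySem.Int.toStr (PySem.Int.floordiv m 60)).toList ++ [':'] ++
             pvPad2 (PySem.Int.toStr (PySem.Int.mod m 60)).toList)

def schedule_from_interval_alt (interval_minutes : Int) : List (String × String) :=
  let times :=
    if interval_minutes = 60 ∨ interval_minutes = 30 then
      (PySem.List.pyRange 540 1021 interval_minutes).map pvFmt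
    else
      ["09:00", "12:00", "18:00"]
  ["Mon", "Tue", "Wed", "Thu", "Fri"].flatMap (fun day => times.map (fun time => (day, time)))

-- ===== PRECONDITION & SPEC =====
def Spec_schedule_from_interval (interval_minutes : Int) (out : List (String × String)) : Prop := out = schedule_from_interval_alt interval_minutes
instance (interval_minutes : Int) (out : List (String × String)) : Decidable (Spec_schedule_from_interval interval_minutes out) := by unfold Spec_schedule_from_interval; infer_instance

-- ===== CLAIM (what is proved, stated in full; the proofs are below) =====
def Claim_equal_schedule_from_interval : Prop := ∀ (interval_minutes : Int), Dom_schedule_from_interval interval_minutes → Spec_schedule_from_interval interval_minutes (schedule_from_interval interval_minutes)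

-- ===== LEMMAS AND PROOFS =====

-- ===== VERDICT (by name: the statement is the Claim_ definition above) =====
theorem schedule_from_interval_spec : Claim_equal_schedule_from_interval := by
  intro n _
  unfold Spec_schedule_from_interval
  by_cases h60 : n = 60
  · subst h60; decide
  · by_cases h30 : n = 30
    · subst h30; decide
    · simp [schedule_from_interval, schedule_from_interval_alt, h60, h30]
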